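-- pv_equiv track=rewrite | github.com/ohdowon064/Python_Algorithm | 5201.py | transport
-- ===== SOURCE A (Python) =====
-- def transport(truck, container):
--     container.sort(reverse=True)
--     truck.sort(reverse=True)
--     load = []
--     while truck:
--         if truck[0] >= container[0]:
--             load.append(container[0])
--             truck.pop(0)
--         container.pop(0)
--         if not container: break
--     return sum(load)
-- ===== SOURCE B (Python) =====
-- def transport(truck, container):
--     ts = iter(sorted(truck, reverse=True))
--     total = 0
--     t = next(ts, None)
--     for c in sorted(container, reverse=True):
--         if t is not None and t >= c:
--             total += c
--             t = next(ts, None)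
--     return total
-- ===== Notes on version B (the rewrite author's own statement) =====
-- stated objective: faster
-- what changed: Replaces A's destructive while-loop over mutated lists (pop(0) is O(n) each time) with a single non-mutating sweep over the sorted containers advancing a truck iterator, accumulating the sum directly instead of building a load list.
-- outside the precondition, e.g. on transport([1], []): A raises IndexError, B returns 0
-- crash fix: On a nonempty truck list with an empty container list A raises IndexError (container[0]); B returns 0. — e.g. on transport([1], []): A raises IndexError, B returns 0
import Mathlib
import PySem

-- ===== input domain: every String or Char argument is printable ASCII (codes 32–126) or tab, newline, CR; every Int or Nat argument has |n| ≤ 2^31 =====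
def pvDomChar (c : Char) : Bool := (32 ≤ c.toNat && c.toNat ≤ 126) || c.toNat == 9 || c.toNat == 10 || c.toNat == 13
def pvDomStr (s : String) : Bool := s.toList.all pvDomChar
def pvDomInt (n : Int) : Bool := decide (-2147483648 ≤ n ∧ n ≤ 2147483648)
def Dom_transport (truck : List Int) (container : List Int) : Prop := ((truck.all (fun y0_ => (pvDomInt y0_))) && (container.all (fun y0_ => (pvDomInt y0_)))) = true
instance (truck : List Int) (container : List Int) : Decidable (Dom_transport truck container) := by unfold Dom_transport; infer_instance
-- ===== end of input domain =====

-- B replaces A's destructive pop(0) while-loop with a non-mutating sorted sweep summing directly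
-- (objective: faster; A also sorts/pops its argument lists in place — only the return value is compared here).


-- ===== PORT A =====
-- A's while-loop: state = (truck, container, load); each iteration possibly pops truck[0]
-- and appends container[0] to load, then pops container[0], breaking when container empties.
-- The truck ≠ [] ∧ container = [] branch is where Python raises IndexError (excluded by Pre_);
-- the port returns the accumulated load there (value irrelevant under Pre_).
def transportLoopA (truck : List Int) (container : List Int) (load : List Int) : List Int :=
  match truck, container with
  | [], _ => load
  | _ :: _, [] => load
  | t :: ts, c :: cs =>
      let state := if t ≥ c then (ts, load ++ [c]) else (t :: ts, load)
      if cs = [] then state.2 else transportLoopA state.1 cs state.2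

def transport (truck : List Int) (container : List Int) : Int :=
  (transportLoopA (PySem.List.sorted truck (fun x => x) true)
                  (PySem.List.sorted container (fun x => x) true) []).sum

-- ===== PORT B =====
-- B's for-loop over the sorted containers, carrying the truck iterator's remaining
-- elements (next(ts, None) = head?/tail) and the running total.
def transportLoopB (ts : List Int) (cs : List Int) (total : Int) : Int :=
  match cs with
  | [] => total
  | c :: cs' =>
      match ts with
      | t :: ts' => if t ≥ c then transportLoopB ts' cs' (total + c)
                    else transportLoopB (t :: ts') cs' total
      | [] => transportLoopB [] cs' total

def transport_alt (truck : List Int) (container : List Int) : Int :=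
  transportLoopB (PySem.List.sorted truck (fun x => x) true)
                 (PySem.List.sorted container (fun x => x) true) 0

-- ===== PRECONDITION & SPEC =====
-- Pre_ excludes exactly the inputs where A raises IndexError: a nonempty truck with an empty container.
def Pre_transport (truck : List Int) (container : List Int) : Prop :=
  truck = [] ∨ container ≠ []
instance (truck : List Int) (container : List Int) : Decidable (Pre_transport truck container) := by
  unfold Pre_transport; infer_instance

def pvWitness_transport : List Int × List Int := ([13, 25, 1], [70, 20, 30])

-- On a nonempty truck list with an empty container list A raises IndexError (container[0]); B returns 0.
def Raises_transport (truck : List Int) (container : List Int) : Prop :=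
  truck ≠ [] ∧ container = []
instance (truck : List Int) (container : List Int) : Decidable (Raises_transport truck container) := by
  unfold Raises_transport; infer_instance
def pvRaiseWitness_transport : List Int × List Int := ([1], [])
def pvRaiseWitnessOut_transport : Int := 0

def Spec_transport (truck : List Int) (container : List Int) (out : Int) : Prop := out = transport_alt truck container
instance (truck : List Int) (container : List Int) (out : Int) : Decidable (Spec_transport truck container out) := by unfold Spec_transport; infer_instance

-- ===== CLAIM (what is proved, stated in full; the proofs are below) =====
def Claim_equal_transport : Prop := ∀ (truck : List Int) (container : List Int), Dom_transport truck container → Pre_transport truck container → Spec_transport truck container (transport truck container)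
def Claim_raises_transport : Prop := (∀ (truck : List Int) (container : List Int), Dom_transport truck container → Raises_transport truck container → ¬ Pre_transport truck container) ∧ (Dom_transport (pvRaiseWitness_transport.1) (pvRaiseWitness_transport.2) ∧ Raises_transport (pvRaiseWitness_transport.1) (pvRaiseWitness_transport.2) ∧ transport_alt (pvRaiseWitness_transport.1) (pvRaiseWitness_transport.2) = pvRaiseWitnessOut_transport)

-- ===== LEMMAS AND PROOFS =====
theorem transportLoopB_nil (cs : List Int) (total : Int) :
    transportLoopB [] cs total = total := by
  induction cs with
  | nil => rfl
  | cons c cs' ih => simpa [transportLoopB] using ih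

-- Core invariant: the sum of A's loop result equals B's loop run from the same sum.
theorem loopA_sum_eq_loopB (cs ts : List Int) (load : List Int) :
    (transportLoopA ts cs load).sum = transportLoopB ts cs load.sum := by
  induction cs generalizing ts load with
  | nil =>
      cases ts <;> simp [transportLoopA, transportLoopB]
  | cons c cs' ih =>
      cases ts with
      | nil => simp [transportLoopA, transportLoopB_nil]
      | cons t ts' =>
          by_cases h : t ≥ c
          · by_cases hcs : cs' = []
            · subst hcs
              simp [transportLoopA, transportLoopB, h, add_comm]
            · simp [transportLoopA, transportLoopB, h, hcs, ih, add_comm]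
          · by_cases hcs : cs' = []
            · subst hcs
              simp [transportLoopA, transportLoopB, h]
            · simp [transportLoopA, transportLoopB, h, hcs, ih]

-- ===== VERDICT (by name: the statement is the Claim_ definition above) =====
theorem transport_spec : Claim_equal_transport := by
  intro truck container _ _
  unfold Spec_transport transport transport_alt
  simpa using loopA_sum_eq_loopB _ _ []

@[simp] theorem transport_raises : Claim_raises_transport := by
  unfold Claim_raises_transport
  constructor
  · intro truck container _ hr hp
    rcases hr with ⟨ht, hc⟩
    cases hp with
    | inl h => exact ht h
    | inr h => exact h hc
  · decide
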